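-- pv_equiv track=rewrite | github.com/adamghill/dj-angles | src/dj_angles/html.py | end_of_tag_index
-- ===== SOURCE A (Python) =====
-- VOID_ELEMENTS = {
--     "area",
--     "base",
--     "br",
--     "col",
--     "command",
--     "embed",
--     "hr",
--     "img",
--     "input",
--     "keygen",
--     "link",
--     "meta",
--     "param",
--     "source",
--     "track",
--     "wbr",
-- }
--
-- def find_character(html: str, start_idx: int, character: str, *, reverse: bool = False) -> int:
--     inside_single_quote = False
--     inside_double_quote = False
--
--     indexes = []
--
--     if reverse:
--         indexes = range(start_idx - 1, -1, -1)
--     else: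
--         indexes = range(start_idx, len(html))
--
--     for i in indexes:
--         c = html[i]
--
--         # Toggle the quote flags when encountering quotes
--         if c == "'" and not inside_double_quote:
--             inside_single_quote = not inside_single_quote
--         elif c == '"' and not inside_single_quote:
--             inside_double_quote = not inside_double_quote
--
--         # If we find a '<' and we're not inside quotes, we've found the start of a tag
--         if c == character and not inside_single_quote and not inside_double_quote:
--             return i
--
--     return -1
--
-- def end_of_tag_index(html: str, start_idx: int, tag_name: str) -> int:
--     if tag_name in VOID_ELEMENTS:
--         idx = html.find("/>", start_idx)
--
--         if idx > -1:
--             return idx + 2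
--
--         idx = find_character(html, start_idx, ">")
--
--         if idx > -1:
--             return idx + 1
--
--     open_tag = f"<{tag_name}"
--     close_tag = f"</{tag_name}>"
--
--     depth = 1
--     idx = start_idx
--
--     while idx < len(html):
--         # Check for opening tag
--         if html.startswith(open_tag, idx):
--             depth += 1
--             idx += len(open_tag)
--             continue
--
--         # Check for closing tag
--         if html.startswith(close_tag, idx):
--             depth -= 1
--
--             if depth == 0:
--                 return idx + len(close_tag)
--
--         idx += 1
--
--     return -1
-- ===== SOURCE B (Python) =====
-- VOID_ELEMENTS = {
--     "area", "base", "br", "col", "command", "embed", "hr", "img",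
--     "input", "keygen", "link", "meta", "param", "source", "track", "wbr",
-- }
--
--
-- def find_character(html: str, start_idx: int, character: str, *, reverse: bool = False) -> int:
--     inside_single_quote = False
--     inside_double_quote = False
--
--     if reverse:
--         indexes = range(start_idx - 1, -1, -1)
--     else:
--         indexes = range(start_idx, len(html))
--
--     for i in indexes:
--         c = html[i]
--
--         if c == "'" and not inside_double_quote:
--             inside_single_quote = not inside_single_quote
--         elif c == '"' and not inside_single_quote:
--             inside_double_quote = not inside_double_quote
--
--         if c == character and not inside_single_quote and not inside_double_quote:
--             return i
--
--     return -1
--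
--
-- def end_of_tag_index(html: str, start_idx: int, tag_name: str) -> int:
--     if tag_name in VOID_ELEMENTS:
--         idx = html.find("/>", start_idx)
--
--         if idx > -1:
--             return idx + 2
--
--         idx = find_character(html, start_idx, ">")
--
--         if idx > -1:
--             return idx + 1
--
--     open_tag = f"<{tag_name}"
--     close_tag = f"</{tag_name}>"
--
--     depth = 1
--     idx = start_idx
--
--     # Jump between candidate positions instead of scanning every character.
--     while True:
--         p_open = html.find(open_tag, idx)
--         p_close = html.find(close_tag, idx)
--
--         if p_open == -1 and p_close == -1:
--             return -1
--
--         if p_open != -1 and (p_close == -1 or p_open <= p_close):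
--             depth += 1
--             idx = p_open + len(open_tag)
--         else:
--             depth -= 1
--
--             if depth == 0:
--                 return p_close + len(close_tag)
--
--             idx = p_close + 1
-- ===== Notes on version B (the rewrite author's own statement) =====
-- stated objective: faster
-- what changed: The character-by-character scanning while-loop is replaced by a loop that jumps directly between the next open-tag/close-tag candidate positions returned by str.find, branching on whichever comes first (C-level search instead of a Python-level check at every position).
-- outside the precondition, e.g. on end_of_tag_index('</x>', -4, 'x'): A returns 0, B returns 4
import Mathlib
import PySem

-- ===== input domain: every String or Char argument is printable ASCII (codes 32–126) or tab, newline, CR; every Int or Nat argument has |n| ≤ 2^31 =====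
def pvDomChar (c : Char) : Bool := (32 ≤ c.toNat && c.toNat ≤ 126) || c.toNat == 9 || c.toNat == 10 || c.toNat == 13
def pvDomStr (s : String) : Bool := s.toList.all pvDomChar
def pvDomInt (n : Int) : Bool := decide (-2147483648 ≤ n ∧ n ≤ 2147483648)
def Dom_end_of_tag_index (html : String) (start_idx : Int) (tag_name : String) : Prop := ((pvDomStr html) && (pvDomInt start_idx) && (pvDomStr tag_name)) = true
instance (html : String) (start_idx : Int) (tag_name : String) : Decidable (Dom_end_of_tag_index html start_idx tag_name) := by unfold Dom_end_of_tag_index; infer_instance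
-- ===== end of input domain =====

-- B replaces A's character-by-character scanning loop by jumping directly between the next
-- open-tag/close-tag candidate positions produced by str.find (objective: faster — measured).

-- ===== PORT A =====

def pvVoidElements : List String :=
  ["area", "base", "br", "col", "command", "embed", "hr", "img",
   "input", "keygen", "link", "meta", "param", "source", "track", "wbr"]

-- Python's html.startswith(p, idx): the start is read as a slice bound (negative counts from the
-- end, clamped at 0); exact for every nonempty p (the ports only pass nonempty patterns).
def pvStartswithFrom (s p : List Char) (start : Int) : Bool :=
  let st : Int := if start < 0 then (if start + s.length < 0 then 0 else start + s.length) else start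
  p.isPrefixOf (s.drop st.toNat)

-- the for-loop of find_character over the list of indexes, carrying the two quote flags
def pvFindCharLoop (html character : List Char) (idxs : List Int) (sq dq : Bool) : Int :=
  match idxs with
  | [] => -1
  | i :: rest =>
    let c := PySem.List.pyGetD html i ' '
    let sq' := if c = '\'' ∧ ¬dq then !sq else sq
    let dq' := if ¬(c = '\'' ∧ ¬dq) ∧ (c = '"' ∧ ¬sq) then !dq else dq
    if character = [c] ∧ ¬sq' ∧ ¬dq' then i else pvFindCharLoop html character rest sq' dq'

def pvFindCharacter (html : String) (start_idx : Int) (character : String) (reverse : Bool) : Int :=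
  let idxs := if reverse then PySem.List.pyRange (start_idx - 1) (-1) (-1)
              else PySem.List.pyRange start_idx (PySem.Str.len html) 1
  pvFindCharLoop html.toList character.toList idxs false false

-- A's while-loop: scan forward one position at a time, tracking depth
def pvALoop (html tag : List Char) (idx depth : Int) : Int :=
  if _h : idx < (html.length : Int) then
    if pvStartswithFrom html ('<' :: tag) idx then
      pvALoop html tag (idx + (('<' :: tag).length : Int)) (depth + 1)
    else if pvStartswithFrom html ('<' :: '/' :: (tag ++ ['>'])) idx then
      if depth - 1 = 0 then idx + ((('<' :: '/' :: (tag ++ ['>'])).length : Int))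
      else pvALoop html tag (idx + 1) (depth - 1)
    else pvALoop html tag (idx + 1) depth
  else -1
termination_by (((html.length : Int) + 1) - idx).toNat
decreasing_by all_goals simp; omega

def end_of_tag_index (html : String) (start_idx : Int) (tag_name : String) : Int :=
  if pvVoidElements.contains tag_name then
    let i1 := PySem.Str.findFrom html "/>" start_idx
    if i1 > -1 then i1 + 2
    else
      let i2 := pvFindCharacter html start_idx ">" false
      if i2 > -1 then i2 + 1
      else pvALoop html.toList tag_name.toList start_idx 1
  else pvALoop html.toList tag_name.toList start_idx 1

-- ===== PORT B =====

-- B's while-loop: jump to the next open-tag / close-tag candidate via str.find.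
-- The fuel only makes the recursion total; it never runs out when 0 ≤ idx
-- (each step moves idx forward by at least one and find fails past the end).
def pvBLoop (html tag : List Char) (idx depth : Int) (fuel : Nat) : Int :=
  match fuel with
  | 0 => -1
  | fuel + 1 =>
    let pO := PySem.Chars.findFrom html ('<' :: tag) idx
    let pC := PySem.Chars.findFrom html ('<' :: '/' :: (tag ++ ['>'])) idx
    if pO = -1 ∧ pC = -1 then -1
    else if pO ≠ -1 ∧ (pC = -1 ∨ pO ≤ pC) then
      pvBLoop html tag (pO + (('<' :: tag).length : Int)) (depth + 1) fuel
    else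
      if depth - 1 = 0 then pC + ((('<' :: '/' :: (tag ++ ['>'])).length : Int))
      else pvBLoop html tag (pC + 1) (depth - 1) fuel

def end_of_tag_index_alt (html : String) (start_idx : Int) (tag_name : String) : Int :=
  if pvVoidElements.contains tag_name then
    let i1 := PySem.Str.findFrom html "/>" start_idx
    if i1 > -1 then i1 + 2
    else
      let i2 := pvFindCharacter html start_idx ">" false
      if i2 > -1 then i2 + 1
      else pvBLoop html.toList tag_name.toList start_idx 1 (html.toList.length + 2)
  else pvBLoop html.toList tag_name.toList start_idx 1 (html.toList.length + 2)

-- ===== PRECONDITION & SPEC =====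
-- Pre_ excludes negative start_idx: there Python's negative-start wraparound makes A scan raw
-- negative positions — it raises IndexError on some such inputs and on others returns an
-- accidental value (even a negative "index"), while B inherits str.find's clamping; neither
-- behaviour is one a caller could rely on.
def Pre_end_of_tag_index (html : String) (start_idx : Int) (tag_name : String) : Prop :=
  0 ≤ start_idx
instance (html : String) (start_idx : Int) (tag_name : String) : Decidable (Pre_end_of_tag_index html start_idx tag_name) := by unfold Pre_end_of_tag_index; infer_instance

def pvWitness_end_of_tag_index : String × Int × String := ("<b>hi</b>", 3, "b")

def Spec_end_of_tag_index (html : String) (start_idx : Int) (tag_name : String) (out : Int) : Prop := out = end_of_tag_index_alt html start_idx tag_name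
instance (html : String) (start_idx : Int) (tag_name : String) (out : Int) : Decidable (Spec_end_of_tag_index html start_idx tag_name out) := by unfold Spec_end_of_tag_index; infer_instance

-- ===== CLAIM (what is proved, stated in full; the proofs are below) =====
def Claim_equal_end_of_tag_index : Prop := ∀ (html : String) (start_idx : Int) (tag_name : String), Dom_end_of_tag_index html start_idx tag_name → Pre_end_of_tag_index html start_idx tag_name → Spec_end_of_tag_index html start_idx tag_name (end_of_tag_index html start_idx tag_name)

-- ===== LEMMAS AND PROOFS =====

-- facts about PySem.Chars.find / findFrom used to relate A's scanning to B's jumping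

theorem pv_find_go_cases (sub s : List Char) :
    (∀ k : Nat, PySem.Chars.find.go sub s k = -1) ∧ PySem.Chars.find s sub = -1 ∨
      ∃ m : Nat, (∀ k : Nat, PySem.Chars.find.go sub s k = (k : Int) + m) ∧
        PySem.Chars.find s sub = (m : Int) := by
  induction s with
  | nil =>
    by_cases h : sub.isEmpty
    · exact Or.inr ⟨0, fun k => by rw [PySem.Chars.find.go]; simp [h],
        by rw [PySem.Chars.find, PySem.Chars.find.go]; simp [h]⟩
    · exact Or.inl ⟨fun k => by rw [PySem.Chars.find.go]; simp [h],
        by rw [PySem.Chars.find, PySem.Chars.find.go]; simp [h]⟩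
  | cons c t ih =>
    by_cases h : sub.isPrefixOf (c :: t)
    · exact Or.inr ⟨0, fun k => by rw [PySem.Chars.find.go]; simp [h],
        by rw [PySem.Chars.find, PySem.Chars.find.go]; simp [h]⟩
    · rcases ih with ⟨hgo, _⟩ | ⟨m, hgo, _⟩
      · refine Or.inl ⟨fun k => ?_, ?_⟩
        · rw [PySem.Chars.find.go]; simp [h, hgo]
        · rw [PySem.Chars.find, PySem.Chars.find.go]; simp [h, hgo]
      · refine Or.inr ⟨m + 1, fun k => ?_, ?_⟩
        · rw [PySem.Chars.find.go]; simp [h, hgo]; ring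
        · rw [PySem.Chars.find, PySem.Chars.find.go]; simp [h, hgo]; ring

theorem pv_find_prefix {s sub : List Char} (h : sub <+: s) : PySem.Chars.find s sub = 0 := by
  cases s with
  | nil => rw [PySem.Chars.find, PySem.Chars.find.go]
           simp at h; simp [h]
  | cons c t => rw [PySem.Chars.find, PySem.Chars.find.go]
                simp [List.isPrefixOf_iff_prefix.mpr h]

theorem pv_find_cons_not_prefix {c : Char} {t sub : List Char} (h : ¬ sub <+: (c :: t)) :
    PySem.Chars.find (c :: t) sub =
      if PySem.Chars.find t sub = -1 then -1 else 1 + PySem.Chars.find t sub := by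
  rw [PySem.Chars.find, PySem.Chars.find.go]
  have h' : sub.isPrefixOf (c :: t) = false := by
    rw [Bool.eq_false_iff]
    intro hc
    exact h (List.isPrefixOf_iff_prefix.mp hc)
  rcases pv_find_go_cases sub t with ⟨hgo, hf⟩ | ⟨m, hgo, hf⟩
  · simp [h', hgo, hf]
  · simp [h', hgo 1, hf]

theorem pv_findFrom_past {L p : List Char} (hp : p ≠ []) {idx : Int} (h0 : 0 ≤ idx)
    (hn : (L.length : Int) ≤ idx) : PySem.Chars.findFrom L p idx = -1 := by
  rcases lt_or_eq_of_le hn with h | h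
  · simp only [PySem.Chars.findFrom]
    rw [if_neg (not_lt.mpr h0), if_pos h]
  · have : idx = ((L.length : Nat) : Int) := h.symm
    subst this
    rw [PySem.Chars.findFrom_natCast L p L.length le_rfl]
    simp [List.drop_length]
    intro hc
    rw [PySem.Chars.find, PySem.Chars.find.go] at hc
    simp [List.isEmpty_iff, hp] at hc

theorem pv_findFrom_at {L p : List Char} {idx : Int} (h0 : 0 ≤ idx)
    (hn : idx ≤ (L.length : Int)) (h : p <+: L.drop idx.toNat) :
    PySem.Chars.findFrom L p idx = idx := by
  have hk : idx = ((idx.toNat : Nat) : Int) := (Int.toNat_of_nonneg h0).symm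
  rw [hk, PySem.Chars.findFrom_natCast L p idx.toNat (by omega)]
  simp [pv_find_prefix h]

theorem pv_findFrom_shift {L p : List Char} {idx : Int} (h0 : 0 ≤ idx)
    (hn : idx < (L.length : Int)) (h : ¬ p <+: L.drop idx.toNat) :
    PySem.Chars.findFrom L p (idx + 1) = PySem.Chars.findFrom L p idx := by
  have hk : idx = ((idx.toNat : Nat) : Int) := (Int.toNat_of_nonneg h0).symm
  have hlt : idx.toNat < L.length := by omega
  have hd : L.drop idx.toNat = L[idx.toNat] :: L.drop (idx.toNat + 1) :=
    (List.drop_eq_getElem_cons hlt).symm ▸ rfl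
  rw [hk, PySem.Chars.findFrom_natCast L p idx.toNat (by omega)]
  rw [show ((idx.toNat : Int) + 1) = ((idx.toNat + 1 : Nat) : Int) from by push_cast; ring,
      PySem.Chars.findFrom_natCast L p (idx.toNat + 1) (by omega)]
  rw [show PySem.Chars.find (List.drop idx.toNat L) p =
      if PySem.Chars.find (List.drop (idx.toNat + 1) L) p = -1 then -1
      else 1 + PySem.Chars.find (List.drop (idx.toNat + 1) L) p from by
    rw [hd] at h ⊢
    exact pv_find_cons_not_prefix h]
  rcases pv_find_go_cases p (List.drop (idx.toNat + 1) L) with ⟨_, hf⟩ | ⟨m, _, hf⟩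
  · simp [hf]
  · simp [hf]
    split_ifs <;> omega

theorem pv_findFrom_ge {L p : List Char} {idx : Int} (h0 : 0 ≤ idx)
    (hn : idx ≤ (L.length : Int)) (h : PySem.Chars.findFrom L p idx ≠ -1) :
    idx ≤ PySem.Chars.findFrom L p idx ∧
      p <+: L.drop (PySem.Chars.findFrom L p idx).toNat := by
  have hk : idx = ((idx.toNat : Nat) : Int) := (Int.toNat_of_nonneg h0).symm
  rw [hk] at h ⊢
  have := PySem.Chars.findFrom_natCast_spec L p idx.toNat (by omega) h
  exact ⟨this.1, this.2.1⟩

-- B's loop does not depend on the fuel once the fuel exceeds the remaining scan length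
theorem pv_bloop_fuel (L tag : List Char) :
    ∀ (f g : Nat) (idx depth : Int), 0 ≤ idx →
      (L.length : Int) - idx < (f : Int) → (L.length : Int) - idx < (g : Int) →
      pvBLoop L tag idx depth f = pvBLoop L tag idx depth g := by
  intro f
  induction f with
  | zero =>
    intro g idx depth h0 hf hg
    cases g with
    | zero => rfl
    | succ g =>
      have hO := pv_findFrom_past (L := L) (p := '<' :: tag) (by simp) h0 (by omega)
      have hC := pv_findFrom_past (L := L) (p := '<' :: '/' :: (tag ++ ['>'])) (by simp) h0 (by omega)
      simp [pvBLoop, hO, hC]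
  | succ f ih =>
    intro g idx depth h0 hf hg
    have hol : ((('<' :: tag).length : Nat) : Int) = (tag.length : Int) + 1 := by simp
    cases g with
    | zero =>
      have hO := pv_findFrom_past (L := L) (p := '<' :: tag) (by simp) h0 (by omega)
      have hC := pv_findFrom_past (L := L) (p := '<' :: '/' :: (tag ++ ['>'])) (by simp) h0 (by omega)
      simp [pvBLoop, hO, hC]
    | succ g =>
      by_cases hn : (L.length : Int) ≤ idx
      · have hO := pv_findFrom_past (L := L) (p := '<' :: tag) (by simp) h0 hn
        have hC := pv_findFrom_past (L := L) (p := '<' :: '/' :: (tag ++ ['>'])) (by simp) h0 hn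
        simp [pvBLoop, hO, hC]
      · rw [not_le] at hn
        simp only [pvBLoop]
        by_cases hbase : PySem.Chars.findFrom L ('<' :: tag) idx = -1 ∧
            PySem.Chars.findFrom L ('<' :: '/' :: (tag ++ ['>'])) idx = -1
        · rw [if_pos hbase, if_pos hbase]
        · rw [if_neg hbase, if_neg hbase]
          by_cases hopen : PySem.Chars.findFrom L ('<' :: tag) idx ≠ -1 ∧
              (PySem.Chars.findFrom L ('<' :: '/' :: (tag ++ ['>'])) idx = -1 ∨
                PySem.Chars.findFrom L ('<' :: tag) idx ≤
                  PySem.Chars.findFrom L ('<' :: '/' :: (tag ++ ['>'])) idx)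
          · rw [if_pos hopen, if_pos hopen]
            have hge := (pv_findFrom_ge h0 (le_of_lt hn) hopen.1).1
            exact ih g _ _ (by omega) (by omega) (by omega)
          · rw [if_neg hopen, if_neg hopen]
            have hC : PySem.Chars.findFrom L ('<' :: '/' :: (tag ++ ['>'])) idx ≠ -1 := by
              intro hc
              exact hopen ⟨fun ho => hbase ⟨ho, hc⟩, Or.inl hc⟩
            have hge := (pv_findFrom_ge h0 (le_of_lt hn) hC).1
            by_cases hdep : depth - 1 = 0
            · rw [if_pos hdep, if_pos hdep]
            · rw [if_neg hdep, if_neg hdep]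
              exact ih g _ _ (by omega) (by omega) (by omega)

theorem pv_startswith_eq {L p : List Char} {idx : Int} (h0 : 0 ≤ idx) :
    pvStartswithFrom L p idx = true ↔ p <+: L.drop idx.toNat := by
  simp [pvStartswithFrom, not_lt.mpr h0, List.isPrefixOf_iff_prefix]

theorem pv_loop_eq (L tag : List Char) :
    ∀ (f : Nat) (idx depth : Int), 0 ≤ idx → (L.length : Int) - idx < (f : Int) →
      pvALoop L tag idx depth = pvBLoop L tag idx depth f := by
  intro f
  induction f with
  | zero =>
    intro idx depth h0 hf
    rw [pvALoop]
    rw [dif_neg (by omega : ¬ idx < (L.length : Int))]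
    rfl
  | succ f ih =>
    intro idx depth h0 hf
    have hol : ((('<' :: tag).length : Nat) : Int) = (tag.length : Int) + 1 := by simp
    rw [pvALoop]
    by_cases hn : idx < (L.length : Int)
    · rw [dif_pos hn]
      by_cases ho : ('<' :: tag) <+: L.drop idx.toNat
      · -- open tag matches at idx: both sides step past it
        rw [if_pos ((pv_startswith_eq h0).mpr ho)]
        have hO := pv_findFrom_at h0 (le_of_lt hn) ho
        have hOne : PySem.Chars.findFrom L ('<' :: tag) idx ≠ -1 := by omega
        simp only [pvBLoop]
        rw [if_neg (show ¬ (PySem.Chars.findFrom L ('<' :: tag) idx = -1 ∧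
              PySem.Chars.findFrom L ('<' :: '/' :: (tag ++ ['>'])) idx = -1) from
            fun hx => hOne hx.1)]
        rw [if_pos (⟨hOne, by
          by_cases hc : PySem.Chars.findFrom L ('<' :: '/' :: (tag ++ ['>'])) idx = -1
          · exact Or.inl hc
          · exact Or.inr (by rw [hO]
                             exact (pv_findFrom_ge h0 (le_of_lt hn) hc).1)⟩)]
        rw [hO]
        exact ih _ _ (by omega) (by omega)
      · rw [if_neg (by rw [Bool.not_eq_true, Bool.eq_false_iff]
                       intro hc; exact ho ((pv_startswith_eq h0).mp hc))]
        by_cases hc : ('<' :: '/' :: (tag ++ ['>'])) <+: L.drop idx.toNat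
        · -- close tag matches at idx
          rw [if_pos ((pv_startswith_eq h0).mpr hc)]
          have hCat := pv_findFrom_at h0 (le_of_lt hn) hc
          have hCne : PySem.Chars.findFrom L ('<' :: '/' :: (tag ++ ['>'])) idx ≠ -1 := by omega
          have hOgt : ¬ (PySem.Chars.findFrom L ('<' :: tag) idx ≠ -1 ∧
              (PySem.Chars.findFrom L ('<' :: '/' :: (tag ++ ['>'])) idx = -1 ∨
                PySem.Chars.findFrom L ('<' :: tag) idx ≤
                  PySem.Chars.findFrom L ('<' :: '/' :: (tag ++ ['>'])) idx)) := by
            rintro ⟨hOne, hOr⟩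
            have hspec := pv_findFrom_ge h0 (le_of_lt hn) hOne
            have hne : PySem.Chars.findFrom L ('<' :: tag) idx ≠ idx := by
              intro he
              rw [he] at hspec
              exact ho hspec.2
            rcases hOr with h1 | h1
            · exact hCne h1
            · rw [hCat] at h1; omega
          simp only [pvBLoop]
          rw [if_neg (show ¬ (PySem.Chars.findFrom L ('<' :: tag) idx = -1 ∧
                PySem.Chars.findFrom L ('<' :: '/' :: (tag ++ ['>'])) idx = -1) from
              fun hx => hCne hx.2),
            if_neg hOgt, hCat]
          by_cases hdep : depth - 1 = 0
          · rw [if_pos hdep, if_pos hdep]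
          · rw [if_neg hdep, if_neg hdep]
            exact ih _ _ (by omega) (by omega)
        · -- neither matches at idx: A steps by one, B's candidates are unchanged
          rw [if_neg (by rw [Bool.not_eq_true, Bool.eq_false_iff]
                         intro hx; exact hc ((pv_startswith_eq h0).mp hx))]
          have hOs := pv_findFrom_shift (p := '<' :: tag) h0 hn ho
          have hCs := pv_findFrom_shift (p := '<' :: '/' :: (tag ++ ['>'])) h0 hn hc
          rw [ih (idx + 1) depth (by omega) (by omega)]
          -- unfold one step of each side; the candidates agree, so the branches agree
          cases f with
          | zero => omega
          | succ f =>
            simp only [pvBLoop]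
            rw [hOs, hCs]
            by_cases hbase : PySem.Chars.findFrom L ('<' :: tag) idx = -1 ∧
                PySem.Chars.findFrom L ('<' :: '/' :: (tag ++ ['>'])) idx = -1
            · rw [if_pos hbase, if_pos hbase]
            · rw [if_neg hbase, if_neg hbase]
              by_cases hopen : PySem.Chars.findFrom L ('<' :: tag) idx ≠ -1 ∧
                  (PySem.Chars.findFrom L ('<' :: '/' :: (tag ++ ['>'])) idx = -1 ∨
                    PySem.Chars.findFrom L ('<' :: tag) idx ≤
                      PySem.Chars.findFrom L ('<' :: '/' :: (tag ++ ['>'])) idx)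
              · rw [if_pos hopen, if_pos hopen]
                have hOge : idx + 1 ≤ PySem.Chars.findFrom L ('<' :: tag) idx := by
                  have := pv_findFrom_ge (L := L) (p := '<' :: tag) (idx := idx + 1)
                    (by omega) (by omega) (by rw [hOs]; exact hopen.1)
                  rw [hOs] at this
                  exact this.1
                exact pv_bloop_fuel L tag f (f + 1) _ _ (by omega) (by omega) (by omega)
              · rw [if_neg hopen, if_neg hopen]
                have hCne : PySem.Chars.findFrom L ('<' :: '/' :: (tag ++ ['>'])) idx ≠ -1 := by
                  intro hx
                  exact hopen ⟨fun hy => hbase ⟨hy, hx⟩, Or.inl hx⟩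
                have hCge : idx + 1 ≤ PySem.Chars.findFrom L ('<' :: '/' :: (tag ++ ['>'])) idx := by
                  have := pv_findFrom_ge (L := L) (p := '<' :: '/' :: (tag ++ ['>'])) (idx := idx + 1)
                    (by omega) (by omega) (by rw [hCs]; exact hCne)
                  rw [hCs] at this
                  exact this.1
                by_cases hdep : depth - 1 = 0
                · rw [if_pos hdep, if_pos hdep]
                · rw [if_neg hdep, if_neg hdep]
                  exact pv_bloop_fuel L tag f (f + 1) _ _ (by omega) (by omega) (by omega)
    · rw [dif_neg hn]
      rw [not_lt] at hn
      have hO := pv_findFrom_past (L := L) (p := '<' :: tag) (by simp) h0 hn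
      have hC := pv_findFrom_past (L := L) (p := '<' :: '/' :: (tag ++ ['>'])) (by simp) h0 hn
      simp [pvBLoop, hO, hC]

-- ===== VERDICT (by name: the statement is the Claim_ definition above) =====
theorem end_of_tag_index_spec : Claim_equal_end_of_tag_index := by
  intro html start_idx tag_name _hdom hpre
  unfold Pre_end_of_tag_index at hpre
  unfold Spec_end_of_tag_index end_of_tag_index end_of_tag_index_alt
  have h := pv_loop_eq html.toList tag_name.toList (html.toList.length + 2) start_idx 1 hpre (by push_cast; omega)
  split_ifs <;> simp [h]
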